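-- pv_equiv track=rewrite | github.com/sara-fish/stable-menus-of-public-goods | vars.py | agent_type_pref
-- ===== SOURCE A (Python) =====
-- def agent_type_pref(agent_type, c1, c2) -> bool:
--     """
--     True if agent_type prefers c1 > c2. False otherwise.
--
--     Keyword arguments:
--     agent_type -- a agent type (ordered tuple of goods, listed best to worst)
--     c1, c2 -- each a good (some element of `agent_type`)
--
--     Examples: agent_type is (1,2,4)
--     1 > 3: True
--     2 > 4: True
--     3 > 5: False
--     5 > 3: False
--     """
--     if c1 == c2:
--         raise ValueError("Cannot compare identical goods")
--     else:
--         for c in agent_type: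
--             if c1 == c:
--                 return True
--             elif c2 == c:
--                 return False
--         # If neither public good appears in agent_type, return false
--         return False
-- ===== SOURCE B (Python) =====
-- def agent_type_pref(agent_type, c1, c2) -> bool:
--     if c1 == c2:
--         raise ValueError("Cannot compare identical goods")
--     try:
--         i1 = agent_type.index(c1)
--     except ValueError:
--         return False
--     try:
--         i2 = agent_type.index(c2)
--     except ValueError:
--         return True
--     return i1 < i2
-- ===== Notes on version B (the rewrite author's own statement) =====
-- stated objective: simpler
-- what changed: Replaces the single interleaved scan with interleaved early returns by two separate first-position lookups (list.index with try/except) whose resulting indices are compared.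
import Mathlib
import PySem

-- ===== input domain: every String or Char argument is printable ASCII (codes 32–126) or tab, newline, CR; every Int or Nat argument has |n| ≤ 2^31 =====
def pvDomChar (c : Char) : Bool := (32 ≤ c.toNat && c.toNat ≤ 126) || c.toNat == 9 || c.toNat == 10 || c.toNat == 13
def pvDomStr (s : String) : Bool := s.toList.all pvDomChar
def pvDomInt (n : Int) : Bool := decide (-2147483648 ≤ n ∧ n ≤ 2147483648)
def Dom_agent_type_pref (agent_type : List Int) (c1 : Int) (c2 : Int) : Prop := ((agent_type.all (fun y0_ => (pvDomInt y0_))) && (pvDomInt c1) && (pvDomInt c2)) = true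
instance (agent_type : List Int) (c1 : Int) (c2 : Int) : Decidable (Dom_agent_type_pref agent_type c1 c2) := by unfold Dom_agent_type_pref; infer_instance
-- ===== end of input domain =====

-- B replaces A's single interleaved scan with two separate first-position lookups compared as indices (objective: simpler; same equal-goods ValueError guard, excluded by Pre_).
-- ===== PORT A =====
-- A: raises ValueError when c1 == c2 (excluded by Pre_; the port returns false there, a value the claim never uses)
def atpLoopA (l : List Int) (c1 c2 : Int) : Bool :=
  match l with
  | [] => false
  | c :: rest => if c1 == c then true else if c2 == c then false else atpLoopA rest c1 c2

def agent_type_pref (agent_type : List Int) (c1 : Int) (c2 : Int) : Bool :=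
  if c1 == c2 then false else atpLoopA agent_type c1 c2

-- ===== PORT B =====
-- B: two separate first-position lookups, then index comparison
def agent_type_pref_alt (agent_type : List Int) (c1 : Int) (c2 : Int) : Bool :=
  if c1 == c2 then false else
  match PySem.List.index? agent_type c1 with
  | none => false
  | some i1 =>
    match PySem.List.index? agent_type c2 with
    | none => true
    | some i2 => decide (i1 < i2)

-- ===== PRECONDITION & SPEC =====
-- Pre_ excludes c1 = c2, where Python A raises ValueError ("Cannot compare identical goods").
def Pre_agent_type_pref (agent_type : List Int) (c1 : Int) (c2 : Int) : Prop := c1 ≠ c2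
instance (agent_type : List Int) (c1 : Int) (c2 : Int) : Decidable (Pre_agent_type_pref agent_type c1 c2) := by unfold Pre_agent_type_pref; infer_instance
def pvWitness_agent_type_pref : List Int × Int × Int := ([1, 2, 4], 2, 4)
def Spec_agent_type_pref (agent_type : List Int) (c1 : Int) (c2 : Int) (out : Bool) : Prop := out = agent_type_pref_alt agent_type c1 c2
instance (agent_type : List Int) (c1 : Int) (c2 : Int) (out : Bool) : Decidable (Spec_agent_type_pref agent_type c1 c2 out) := by unfold Spec_agent_type_pref; infer_instance

-- ===== CLAIM (what is proved, stated in full; the proofs are below) =====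
def Claim_equal_agent_type_pref : Prop := ∀ (agent_type : List Int) (c1 : Int) (c2 : Int), Dom_agent_type_pref agent_type c1 c2 → Pre_agent_type_pref agent_type c1 c2 → Spec_agent_type_pref agent_type c1 c2 (agent_type_pref agent_type c1 c2)

-- ===== LEMMAS AND PROOFS =====
lemma atpLoop_eq (l : List Int) (c1 c2 : Int) (h : c1 ≠ c2) :
    atpLoopA l c1 c2 =
      (match PySem.List.index? l c1 with
       | none => false
       | some i1 =>
         match PySem.List.index? l c2 with
         | none => true
         | some i2 => decide (i1 < i2)) := by
  induction l with
  | nil => simp [atpLoopA, PySem.List.index?]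
  | cons c rest ih =>
    by_cases h1 : c1 = c
    · subst h1
      have hc2 : c1 ≠ c2 := h
      rw [show atpLoopA (c1 :: rest) c1 c2 = true by simp [atpLoopA],
          PySem.List.index?_cons_self, PySem.List.index?_cons_of_ne rest hc2]
      cases PySem.List.index? rest c2 <;> simp
    · by_cases h2 : c2 = c
      · subst h2
        have hc1 : c2 ≠ c1 := fun he => h1 he.symm
        rw [show atpLoopA (c2 :: rest) c1 c2 = false by simp [atpLoopA, h1],
            PySem.List.index?_cons_self, PySem.List.index?_cons_of_ne rest hc1]
        cases PySem.List.index? rest c1 <;> simp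
      · have hc1 : c ≠ c1 := fun he => h1 he.symm
        have hc2 : c ≠ c2 := fun he => h2 he.symm
        rw [show atpLoopA (c :: rest) c1 c2 = atpLoopA rest c1 c2 by
              simp [atpLoopA, hc1.symm, hc2.symm],
            PySem.List.index?_cons_of_ne rest hc1,
            PySem.List.index?_cons_of_ne rest hc2, ih]
        cases PySem.List.index? rest c1 <;> cases PySem.List.index? rest c2 <;> simp

-- ===== VERDICT (by name: the statement is the Claim_ definition above) =====
theorem agent_type_pref_spec : Claim_equal_agent_type_pref := by
  intro l c1 c2 _ hpre
  unfold Pre_agent_type_pref at hpre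
  unfold Spec_agent_type_pref agent_type_pref agent_type_pref_alt
  have hne : (c1 == c2) = false := by simp [hpre]
  simp only [hne, Bool.false_eq_true, if_false]
  exact atpLoop_eq l c1 c2 hpre
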